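-- pv_equiv track=rewrite | github.com/AgbaD/Data-Structures-Algorithms | new/foobar/find_access_code.py | solution
-- ===== SOURCE A (Python) =====
-- def solution(l):
--     """
--         Write a function solution(l) that takes a list of positive integers l
--         and counts the number of "lucky triples" of (li, lj, lk) where the
--         list indices meet the requirement i < j < k.  The length of l is between
--         2 and 2000 inclusive.  The elements of l are between 1 and 999999 inclusive.
--         The solution fits within a signed 32-bit integer. Some of the lists are
--         purposely generated without any access codes to throw off spies, so if
--         no triples are found, return 0.
--
--         For example, [1, 2, 3, 4, 5, 6] has the triples: [1, 2, 4], [1, 2, 6], [1, 3, 6],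
--         making the solution 3 total.
--     """
--     # dynamic programming
--     c = [0] * len(l)
--     count = 0
--     for i in range(len(l)):
--         for j in range(i):
--             if l[i] % l[j] == 0:
--                 c[i] += 1
--                 count += c[j]
--     return count
-- ===== SOURCE B (Python) =====
-- def solution(l):
--     # Direct exhaustive count: for every index triple i < j < k, check the two
--     # divisibility conditions; no auxiliary count array.
--     count = 0
--     for k in range(len(l)):
--         for j in range(k):
--             for i in range(j):
--                 if l[j] % l[i] == 0 and l[k] % l[j] == 0:
--                     count += 1
--     return count
-- ===== Notes on version B (the rewrite author's own statement) =====
-- stated objective: alternative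
-- what changed: Replaces the DP count-array accumulation (c[i] tallies divisor pairs, count sums c[j]) with a direct three-level nested scan over all index triples i<j<k checking both divisibility conditions.
import Mathlib
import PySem

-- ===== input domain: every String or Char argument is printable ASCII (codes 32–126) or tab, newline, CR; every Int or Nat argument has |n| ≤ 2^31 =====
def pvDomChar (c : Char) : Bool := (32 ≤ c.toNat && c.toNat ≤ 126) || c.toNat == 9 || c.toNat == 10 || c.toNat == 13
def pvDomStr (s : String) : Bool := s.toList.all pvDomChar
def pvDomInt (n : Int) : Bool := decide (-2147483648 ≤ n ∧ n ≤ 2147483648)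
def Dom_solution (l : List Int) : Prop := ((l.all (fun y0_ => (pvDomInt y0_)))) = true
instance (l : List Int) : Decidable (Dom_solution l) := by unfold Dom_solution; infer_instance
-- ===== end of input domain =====

-- B replaces A's DP count-array accumulation by a direct triple-nested scan over all
-- index triples i<j<k (objective: alternative decomposition; no auxiliary array, not faster).

-- ===== PORT A =====
def solution (l : List Int) : Int :=
  ((PySem.List.pyRange 0 (l.length : Int) 1).foldl
    (fun (st : List Int × Int) i =>
      (PySem.List.pyRange 0 i 1).foldl
        (fun (st : List Int × Int) j =>
          if PySem.Int.mod (PySem.List.pyGetD l i 0) (PySem.List.pyGetD l j 0) = 0 then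
            (PySem.List.pySetD st.1 i (PySem.List.pyGetD st.1 i 0 + 1),
             st.2 + PySem.List.pyGetD (PySem.List.pySetD st.1 i (PySem.List.pyGetD st.1 i 0 + 1)) j 0)
          else st)
        st)
    (List.replicate l.length (0:Int), (0:Int))).2

-- ===== PORT B =====
def solution_alt (l : List Int) : Int :=
  (PySem.List.pyRange 0 (l.length : Int) 1).foldl
    (fun count k =>
      (PySem.List.pyRange 0 k 1).foldl
        (fun count j =>
          (PySem.List.pyRange 0 j 1).foldl
            (fun count i =>
              if PySem.Int.mod (PySem.List.pyGetD l j 0) (PySem.List.pyGetD l i 0) = 0 ∧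
                 PySem.Int.mod (PySem.List.pyGetD l k 0) (PySem.List.pyGetD l j 0) = 0
              then count + 1 else count)
            count)
        count)
    0

-- ===== PRECONDITION & SPEC =====
-- A divides by every element except the last; it raises ZeroDivisionError exactly when 0
-- occurs before the last position, so those inputs are excluded.
def Pre_solution (l : List Int) : Prop := (0 : Int) ∉ l.dropLast
instance (l : List Int) : Decidable (Pre_solution l) := by unfold Pre_solution; infer_instance
def pvWitness_solution : List Int := [1, 2, 3, 4, 5, 6]

def Spec_solution (l : List Int) (out : Int) : Prop := out = solution_alt l
instance (l : List Int) (out : Int) : Decidable (Spec_solution l out) := by unfold Spec_solution; infer_instance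

-- ===== CLAIM (what is proved, stated in full; the proofs are below) =====
def Claim_equal_solution : Prop := ∀ (l : List Int), Dom_solution l → Pre_solution l → Spec_solution l (solution l)

-- ===== LEMMAS AND PROOFS =====

-- l[i] % l[j] == 0 on Nat indices (getD view)
def divP (l : List Int) (i j : Nat) : Bool :=
  decide (PySem.Int.mod (l.getD i 0) (l.getD j 0) = 0)

-- partial divisor count #{ j < t : l[i] % l[j] == 0 } (A's c[i] after t inner steps)
def dvP (l : List Int) (i t : Nat) : Int := ((List.range t).countP (divP l i) : Int)

-- A's final c[i]
def dv (l : List Int) (i : Nat) : Int := dvP l i i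

-- number of lucky triples with top index k; both programs sum sv over all k
def sv (l : List Int) (k : Nat) : Int :=
  ((List.range k).map (fun j => if divP l k j then dv l j else 0)).sum

-- A's c array after m completed outer iterations
def cArr (l : List Int) (m : Nat) : List Int :=
  (List.range l.length).map (fun x => if x < m then dv l x else 0)

-- A's c array during outer iteration i, after t inner steps
def cMid (l : List Int) (i t : Nat) : List Int :=
  (List.range l.length).map (fun x => if x < i then dv l x else if x = i then dvP l i t else 0)

-- the Nat-level inner body of A (after range/index cast normalisation)
def G (l : List Int) (i : Nat) : (List Int × Int) → Nat → (List Int × Int) :=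
  fun st j =>
    if PySem.Int.mod (l.getD i 0) (l.getD j 0) = 0 then
      (st.1.set i (st.1.getD i 0 + 1), st.2 + (st.1.set i (st.1.getD i 0 + 1)).getD j 0)
    else st

lemma foldl_ext {f : Int → Nat → Int} {g : Nat → Int}
    (h : ∀ a k, f a k = a + g k) (xs : List Nat) (a : Int) :
    xs.foldl f a = a + (xs.map g).sum := by
  have : f = fun a k => a + g k := funext fun a => funext fun k => h a k
  rw [this, PySem.List.foldl_add]

lemma map_range_set {β : Type} (f : Nat → β) (n i : Nat) (v : β) :
    ((List.range n).map f).set i v = (List.range n).map (fun x => if x = i then v else f x) := by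
  apply List.ext_getElem
  · simp
  · intro k hk1 hk2
    simp [List.getElem_set, List.getElem_map, List.getElem_range]
    split_ifs with h1 h2 <;> first | rfl | omega

lemma getD_cMid (l : List Int) (i t x : Nat) (hx : x < l.length) :
    (cMid l i t).getD x 0 = if x < i then dv l x else if x = i then dvP l i t else 0 := by
  simp [cMid, List.getD_eq_getElem?_getD, hx]

lemma dvP_succ (l : List Int) (i t : Nat) :
    dvP l i (t+1) = dvP l i t + (if divP l i t then 1 else 0) := by
  simp [dvP, List.range_succ, List.countP_append]

lemma inner_step (l : List Int) (i t : Nat) (hi : i < l.length) (ht : t < i) (cnt : Int) :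
    G l i (cMid l i t, cnt) t
      = (cMid l i (t+1), cnt + (if divP l i t then dv l t else 0)) := by
  unfold G
  by_cases hP : PySem.Int.mod (l.getD i 0) (l.getD t 0) = 0
  · have hd : divP l i t = true := decide_eq_true hP
    simp only [hP, if_true, hd, Prod.mk.injEq]
    have hci : (cMid l i t).getD i 0 = dvP l i t := by
      rw [getD_cMid l i t i hi]; simp
    refine ⟨?_, ?_⟩
    · rw [hci, cMid, map_range_set, cMid]
      apply List.map_congr_left
      intro x hx
      by_cases h1 : x = i
      · subst h1; simp [dvP_succ, hd]
      · simp [h1]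
    · rw [hci, cMid, map_range_set]
      have : ((List.range l.length).map
          (fun x => if x = i then dvP l i t + 1 else if x < i then dv l x else if x = i then dvP l i t else 0)).getD t 0
          = dv l t := by
        simp [List.getD_eq_getElem?_getD, show t < l.length by omega]
        omega
      rw [this]
  · have hd : divP l i t = false := decide_eq_false hP
    simp only [hP, if_false, hd, Prod.mk.injEq]
    refine ⟨?_, ?_⟩
    · unfold cMid
      apply List.map_congr_left
      intro x hx
      by_cases h1 : x = i
      · subst h1; simp [dvP_succ, hd]
      · simp [h1]
    · simp

lemma cArr_eq_cMid_zero (l : List Int) (i : Nat) : cArr l i = cMid l i 0 := by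
  unfold cArr cMid
  apply List.map_congr_left
  intro x hx
  by_cases h1 : x < i
  · simp [h1]
  · simp [h1, dvP]

lemma cMid_self (l : List Int) (i : Nat) : cMid l i i = cArr l (i+1) := by
  unfold cArr cMid
  apply List.map_congr_left
  intro x hx
  by_cases h1 : x < i
  · simp [h1, show x < i + 1 by omega]
  · by_cases h2 : x = i
    · subst h2; simp [dv]
    · simp [h1, h2, show ¬ x < i + 1 by omega]

lemma inner_all (l : List Int) (i : Nat) (hi : i < l.length) :
    ∀ t, t ≤ i → ∀ cnt : Int,
      (List.range t).foldl (G l i) (cMid l i 0, cnt)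
        = (cMid l i t, cnt + ((List.range t).map (fun j => if divP l i j then dv l j else 0)).sum) := by
  intro t
  induction t with
  | zero => intro _ cnt; simp
  | succ t ih =>
      intro ht cnt
      rw [List.range_succ, List.foldl_append, ih (by omega) cnt]
      simp only [List.foldl_cons, List.foldl_nil]
      rw [inner_step l i t hi (by omega)]
      simp [add_assoc]

lemma outer_all (l : List Int) :
    ∀ m, m ≤ l.length →
      (List.range m).foldl
        (fun (st : List Int × Int) (k : Nat) =>
          (PySem.List.pyRange 0 (k : Int) 1).foldl
            (fun (st : List Int × Int) j =>
              if PySem.Int.mod (PySem.List.pyGetD l (k : Int) 0) (PySem.List.pyGetD l j 0) = 0 then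
                (PySem.List.pySetD st.1 (k : Int) (PySem.List.pyGetD st.1 (k : Int) 0 + 1),
                 st.2 + PySem.List.pyGetD (PySem.List.pySetD st.1 (k : Int) (PySem.List.pyGetD st.1 (k : Int) 0 + 1)) j 0)
              else st)
            st)
        (List.replicate l.length (0:Int), (0:Int))
      = (cArr l m, ((List.range m).map (sv l)).sum) := by
  intro m
  induction m with
  | zero =>
      intro _
      simp [cArr, List.map_const']
  | succ m ih =>
      intro hm
      rw [List.range_succ, List.foldl_append, ih (by omega)]
      simp only [List.foldl_cons, List.foldl_nil]
      rw [PySem.List.pyRange_zero_nat]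
      simp only [List.foldl_map, PySem.List.pyGetD_natCast, PySem.List.pySetD_natCast]
      rw [cArr_eq_cMid_zero]
      have h := inner_all l m (by omega) m (le_refl m) (((List.range m).map (sv l)).sum)
      rw [show (fun (st : List Int × Int) (j : Nat) =>
            if PySem.Int.mod (l.getD m 0) (l.getD j 0) = 0 then
              (st.1.set m (st.1.getD m 0 + 1),
               st.2 + (st.1.set m (st.1.getD m 0 + 1)).getD j 0)
            else st) = G l m from rfl] at *
      rw [h, cMid_self]
      simp [sv]

lemma sol_eq (l : List Int) : solution l = ((List.range l.length).map (sv l)).sum := by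
  unfold solution
  rw [PySem.List.pyRange_zero_nat]
  simp only [List.foldl_map]
  rw [outer_all l l.length (le_refl _)]

lemma inner3 (l : List Int) (j k : Nat) (a : Int) :
    (List.range j).foldl
      (fun c i => if PySem.Int.mod (l.getD j 0) (l.getD i 0) = 0 ∧
                    PySem.Int.mod (l.getD k 0) (l.getD j 0) = 0 then c + 1 else c) a
    = a + (if divP l k j then dv l j else 0) := by
  by_cases hQ : PySem.Int.mod (l.getD k 0) (l.getD j 0) = 0
  · simp only [hQ, and_true]
    have h := PySem.List.foldl_count_if (divP l j) (List.range j) a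
    simp only [divP, decide_eq_true_eq] at h
    rw [h]
    have hd : divP l k j = true := decide_eq_true hQ
    simp [hd, dv, dvP]
  · simp only [hQ, and_false, if_false]
    have hd : divP l k j = false := decide_eq_false hQ
    simp [hd, List.foldl_fixed]

lemma alt_eq (l : List Int) : solution_alt l = ((List.range l.length).map (sv l)).sum := by
  unfold solution_alt
  rw [PySem.List.pyRange_zero_nat, List.foldl_map]
  refine (foldl_ext (g := sv l) (fun a k => ?_) _ _).trans (zero_add _)
  rw [PySem.List.pyRange_zero_nat, List.foldl_map]
  refine foldl_ext (g := fun j => if divP l k j then dv l j else 0) (fun a j => ?_) _ _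
  rw [PySem.List.pyRange_zero_nat, List.foldl_map]
  simp only [PySem.List.pyGetD_natCast]
  exact inner3 l j k a

-- ===== VERDICT (by name: the statement is the Claim_ definition above) =====
theorem solution_spec : Claim_equal_solution := by
  intro l _ _
  unfold Spec_solution
  rw [sol_eq, alt_eq]
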